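-- pv_equiv track=rewrite | github.com/aorangehc/Daily-coding | 字节豆包MarsCode-青训营-寒假专场/codes/Python/统计班级中的说谎者.py | solution
-- ===== SOURCE A (Python) =====
-- from collections import defaultdict
--
-- def solution(A):
--     # 对成绩进行排序
--     sorted_A = sorted(A)
--
--     # 创建一个字典，用于存储每个成绩小于或等于自己的学生数量
--     count_dict = defaultdict(int)
--     for i, score in enumerate(sorted_A):
--         count_dict[score] = i + 1
--
--     # 计算说谎的学生数量
--     liars = 0
--     for score in A:
--         less_or_equal = count_dict[score]
--         greater = len(A) - less_or_equal
--         if less_or_equal > greater: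
--             liars += 1
--
--     return liars
-- ===== SOURCE B (Python) =====
-- from collections import Counter
--
-- def solution(A):
--     n = len(A)
--     cnt = Counter(A)
--     total = 0
--     cum = 0
--     for k in sorted(cnt):
--         f = cnt[k]
--         cum += f
--         if 2 * cum > n:
--             total += f
--     return total
-- ===== Notes on version B (the rewrite author's own statement) =====
-- stated objective: simpler
-- what changed: Replaces A's rank dict built from the sorted list plus a per-student loop of n lookups by a Counter and a single prefix-sum sweep over the sorted distinct scores, adding each score's frequency when 2*cum > n.
import Mathlib
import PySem

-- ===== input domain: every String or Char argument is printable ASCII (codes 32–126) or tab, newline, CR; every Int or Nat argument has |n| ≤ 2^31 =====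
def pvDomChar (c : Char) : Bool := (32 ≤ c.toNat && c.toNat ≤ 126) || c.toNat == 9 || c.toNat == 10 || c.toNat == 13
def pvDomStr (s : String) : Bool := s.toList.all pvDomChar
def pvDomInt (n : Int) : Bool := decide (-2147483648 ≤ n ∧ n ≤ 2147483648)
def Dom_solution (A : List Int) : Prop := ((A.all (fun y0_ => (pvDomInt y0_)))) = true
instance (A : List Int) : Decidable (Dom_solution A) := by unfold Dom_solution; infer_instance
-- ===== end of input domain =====

-- B replaces A's per-student loop (n dict lookups) by one prefix-sum sweep over the sorted distinct scores; simpler, same result.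

-- ===== PORT A =====
def solution (A : List Int) : Int :=
  let sortedA := PySem.List.sorted A (fun x => x) false
  let countDict := (PySem.List.enumerate sortedA).foldl
    (fun (d : PySem.Dict Int Int) p => d.insert p.2 (p.1 + 1)) PySem.Dict.empty
  A.foldl (fun liars score =>
    let lessOrEqual := countDict.getD score 0  -- defaultdict(int): missing key reads as 0
    let greater := (A.length : Int) - lessOrEqual
    if lessOrEqual > greater then liars + 1 else liars) 0

-- ===== PORT B =====
def solution_alt (A : List Int) : Int :=
  let n := (A.length : Int)
  let cnt := PySem.Dict.counter A
  ((PySem.List.sorted cnt.keys (fun x => x) false).foldl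
    (fun (st : Int × Int) k =>
      let f := cnt.getD k 0
      let cum := st.1 + f
      (cum, if 2 * cum > n then st.2 + f else st.2)) (0, 0)).2

-- ===== PRECONDITION & SPEC =====
def Spec_solution (A : List Int) (out : Int) : Prop := out = solution_alt A
instance (A : List Int) (out : Int) : Decidable (Spec_solution A out) := by unfold Spec_solution; infer_instance

-- ===== CLAIM (what is proved, stated in full; the proofs are below) =====
def Claim_equal_solution : Prop := ∀ (A : List Int), Dom_solution A → Spec_solution A (solution A)

-- ===== LEMMAS AND PROOFS =====

-- Inserts whose keys all differ from k do not change the value at k.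
theorem pv_getD_foldl_insert_not_mem (l : List (Int × Int)) (d : PySem.Dict Int Int)
    (k : Int) (h : ∀ p ∈ l, p.2 ≠ k) :
    (l.foldl (fun (d : PySem.Dict Int Int) p => d.insert p.2 (p.1 + 1)) d).getD k 0
      = d.getD k 0 := by
  induction l generalizing d with
  | nil => rfl
  | cons p t ih =>
      simp only [List.foldl_cons]
      rw [ih _ (fun q hq => h q (List.mem_cons_of_mem _ hq)),
          PySem.Dict.getD_insert,
          if_neg (fun he => (h p List.mem_cons_self) he.symm)]

-- A's dict on a sorted list: the stored rank of k is start + #{x ≤ k}.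
theorem pv_dictA (s : List Int) (hs : s.Pairwise (· ≤ ·)) (st : Int)
    (d : PySem.Dict Int Int) (k : Int) (hk : k ∈ s) :
    ((PySem.List.enumerate s st).foldl
        (fun (d : PySem.Dict Int Int) p => d.insert p.2 (p.1 + 1)) d).getD k 0
      = st + (s.countP (fun x => decide (x ≤ k)) : Int) := by
  induction s generalizing st d with
  | nil => cases hk
  | cons x t ih =>
      rw [PySem.List.enumerate_cons]
      simp only [List.foldl_cons]
      have hx : ∀ y ∈ t, x ≤ y := fun y hy => (List.pairwise_cons.mp hs).1 y hy
      by_cases hkt : k ∈ t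
      · have hxk : x ≤ k := hx k hkt
        rw [ih (List.pairwise_cons.mp hs).2 (st + 1) _ hkt]
        simp only [List.countP_cons, hxk, decide_true, if_true]
        push_cast
        ring
      · have hk_eq : k = x := by
          rcases List.mem_cons.mp hk with h | h
          · exact h
          · exact absurd h hkt
        subst hk_eq
        have hnone : ∀ p ∈ PySem.List.enumerate t (st + 1), p.2 ≠ k := by
          intro p hp
          rcases (PySem.List.mem_enumerate_iff _ _ _).mp hp with ⟨j, hj, rfl⟩
          intro hcontra
          exact hkt (hcontra ▸ List.getElem_mem hj)
        rw [pv_getD_foldl_insert_not_mem _ _ _ hnone, PySem.Dict.getD_insert]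
        have hct : t.countP (fun x => decide (x ≤ k)) = 0 := by
          rw [List.countP_eq_zero]
          intro y hy
          have : k ≤ y := hx y hy
          have : y ≠ k := fun h => hkt (h ▸ hy)
          simp only [decide_eq_true_eq]
          omega
        simp [hct]

-- Grouping: summing (count in A) over a nodup list of keys covering A computes A.countP.
theorem pv_sum_count (ks : List Int) (hnd : ks.Nodup) (A : List Int)
    (hcov : ∀ x ∈ A, x ∈ ks) (P : Int → Prop) [DecidablePred P] :
    (ks.map (fun k => if P k then (A.count k : Int) else 0)).sum
      = (A.countP (fun x => decide (P x)) : Int) := by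
  induction A with
  | nil => simp
  | cons x A' ih =>
      have hcov' : ∀ y ∈ A', y ∈ ks := fun y hy => hcov y (List.mem_cons_of_mem _ hy)
      have key : (ks.map (fun k => if P k then ((x :: A').count k : Int) else 0)).sum
          = (ks.map (fun k => if P k then (A'.count k : Int) else 0)).sum
            + (if P x then (1 : Int) else 0) := by
        have hx : x ∈ ks := hcov x List.mem_cons_self
        clear hcov hcov' ih
        induction ks with
        | nil => cases hx
        | cons k ks' ihk =>
            rcases List.mem_cons.mp hx with he | hx'
            · subst he
              have hkn : x ∉ ks' := (List.nodup_cons.mp hnd).1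
              simp only [List.map_cons, List.sum_cons, List.count_cons, beq_iff_eq]
              have hrw : (ks'.map (fun k => if P k
                    then ((A'.count k + if x = k then 1 else 0 : Nat) : Int) else 0)).sum
                  = (ks'.map (fun k => if P k then (A'.count k : Int) else 0)).sum := by
                congr 1
                apply List.map_congr_left
                intro j hj
                have hxj : x ≠ j := fun h => hkn (h ▸ hj)
                simp [hxj]
              rw [hrw]
              simp only [if_true]
              split_ifs <;> push_cast <;> ring
            · have hk : k ≠ x := by
                intro h; exact (List.nodup_cons.mp hnd).1 (h ▸ hx')
              have hih := ihk (List.nodup_cons.mp hnd).2 hx'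
              simp only [List.map_cons, List.sum_cons] at *
              rw [List.count_cons]
              simp only [beq_iff_eq, Ne.symm hk, if_false]
              push_cast at hih ⊢
              rw [hih]
              simp only [add_zero]
              ring
      rw [key, ih hcov', List.countP_cons]
      simp only [decide_eq_true_eq]
      split_ifs <;> push_cast <;> ring

-- B's sweep: the running prefix sum names A.countP (≤ k), so the fold totals the grouped sum.
theorem pv_sweep (A : List Int) (n : Int) (ks : List Int) (hs : ks.Pairwise (· < ·))
    (c0 t0 : Int)
    (hc : ∀ k ∈ ks, c0 + (ks.map (fun j => if j ≤ k then (A.count j : Int) else 0)).sum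
            = (A.countP (fun x => decide (x ≤ k)) : Int)) :
    (ks.foldl (fun (st : Int × Int) k =>
        let f := (A.count k : Int)
        let cum := st.1 + f
        (cum, if 2 * cum > n then st.2 + f else st.2)) (c0, t0)).2
      = t0 + (ks.map (fun k =>
          if 2 * (A.countP (fun x => decide (x ≤ k)) : Int) > n
          then (A.count k : Int) else 0)).sum := by
  induction ks generalizing c0 t0 with
  | nil => simp
  | cons k rest ih =>
      have hlt : ∀ j ∈ rest, k < j := fun j hj => (List.pairwise_cons.mp hs).1 j hj
      have hck : c0 + (A.count k : Int) = (A.countP (fun x => decide (x ≤ k)) : Int) := by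
        have := hc k List.mem_cons_self
        have hrest0 : (rest.map (fun j => if j ≤ k then (A.count j : Int) else 0))
            = rest.map (fun _ => (0 : Int)) := by
          apply List.map_congr_left
          intro j hj
          have := hlt j hj
          simp
          omega
        simp only [List.map_cons, List.sum_cons, hrest0] at this
        simpa using this
      have hc' : ∀ j ∈ rest,
          (c0 + (A.count k : Int))
            + (rest.map (fun i => if i ≤ j then (A.count i : Int) else 0)).sum
          = (A.countP (fun x => decide (x ≤ j)) : Int) := by
        intro j hj
        have := hc j (List.mem_cons_of_mem _ hj)
        have hkj : k ≤ j := le_of_lt (hlt j hj)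
        simp only [List.map_cons, List.sum_cons, hkj, if_true] at this
        omega
      simp only [List.foldl_cons]
      rw [ih (List.pairwise_cons.mp hs).2 _ _ hc']
      simp only [List.map_cons, List.sum_cons]
      rw [← hck]
      split_ifs with h
      · ring
      · ring

-- ===== VERDICT (by name: the statement is the Claim_ definition above) =====
theorem solution_spec : Claim_equal_solution := by
  intro A _
  unfold Spec_solution solution solution_alt
  simp only []
  set n : Int := (A.length : Int) with hn
  -- A side
  have hsortP : (PySem.List.sorted A (fun x => x) false).Pairwise (· ≤ ·) := by
    simpa using PySem.List.sorted_pairwise A (fun x => x)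
  have hdict : ∀ score ∈ A,
      (((PySem.List.enumerate (PySem.List.sorted A (fun x => x) false)).foldl
          (fun (d : PySem.Dict Int Int) p => d.insert p.2 (p.1 + 1)) PySem.Dict.empty).getD score 0)
        = (A.countP (fun x => decide (x ≤ score)) : Int) := by
    intro score hsc
    have hmem : score ∈ PySem.List.sorted A (fun x => x) false :=
      (PySem.List.mem_sorted _ _ _ _).mpr hsc
    rw [pv_dictA _ hsortP 0 _ _ hmem]
    rw [(PySem.List.sorted_perm A (fun x => x) false).countP_eq]
    ring
  have hA : (A.foldl (fun liars score =>
      let lessOrEqual := (((PySem.List.enumerate (PySem.List.sorted A (fun x => x) false)).foldl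
          (fun (d : PySem.Dict Int Int) p => d.insert p.2 (p.1 + 1)) PySem.Dict.empty).getD score 0)
      let greater := n - lessOrEqual
      if lessOrEqual > greater then liars + 1 else liars) 0)
      = (A.countP (fun score =>
          decide (2 * (A.countP (fun x => decide (x ≤ score)) : Int) > n)) : Int) := by
    rw [PySem.List.foldl_congr_mem (g := fun liars score =>
        if 2 * (A.countP (fun x => decide (x ≤ score)) : Int) > n then liars + 1 else liars)]
    · rw [PySem.List.foldl_ite_add_one]
      ring
    · intro acc x hx
      simp only [hdict x hx]
      congr 1
      · simp only [eq_iff_iff]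
        constructor <;> intro h <;> omega
  -- B side
  set ks := PySem.List.sorted (PySem.Dict.counter A).keys (fun x => x) false with hks
  have hksS : ks = PySem.List.sorted (PySem.Set.ofList A) (fun x => x) false := by
    rw [hks, PySem.Dict.keys_counter]
  have hksLt : ks.Pairwise (· < ·) := by
    rw [hksS]; exact PySem.List.sorted_ofList_pairwise_lt A
  have hksNd : ks.Nodup := List.Pairwise.imp (fun h => ne_of_lt h) hksLt
  have hksCov : ∀ x ∈ A, x ∈ ks := by
    intro x hx
    rw [hksS]
    exact (PySem.List.mem_sorted _ _ _ _).mpr ((PySem.Set.mem_ofList _ _).mpr hx)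
  have hcnt : ∀ k, (PySem.Dict.counter A).getD k 0 = (A.count k : Int) :=
    fun k => PySem.Dict.getD_counter A k
  have hB : ((ks.foldl (fun (st : Int × Int) k =>
      let f := (PySem.Dict.counter A).getD k 0
      let cum := st.1 + f
      (cum, if 2 * cum > n then st.2 + f else st.2)) (0, 0)).2)
      = (A.countP (fun score =>
          decide (2 * (A.countP (fun x => decide (x ≤ score)) : Int) > n)) : Int) := by
    rw [PySem.List.foldl_congr_mem (g := fun (st : Int × Int) k =>
        let f := (A.count k : Int)
        let cum := st.1 + f
        (cum, if 2 * cum > n then st.2 + f else st.2))]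
    · rw [pv_sweep A n ks hksLt 0 0]
      · rw [pv_sum_count ks hksNd A hksCov
            (fun s => 2 * (A.countP (fun x => decide (x ≤ s)) : Int) > n)]
        ring
      · intro k hk
        rw [pv_sum_count ks hksNd A hksCov (fun j => j ≤ k)]
        simp
    · intro st k hk
      simp only [hcnt]
  rw [hA, ← hB]
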